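-- pv_equiv track=rewrite | github.com/bardbyte/wyla | lumi_final/lumi/publish.py | _render_overwrites_md
-- ===== SOURCE A (Python) =====
-- from typing import Any
--
-- def _render_overwrites_md(ledger: list[dict[str, Any]]) -> str:
--     """Render the merge ledger to a scannable markdown report."""
--     if not ledger:
--         return (
--             "# Proposed overwrites\n\n"
--             "_No baseline values were replaced this run — every existing "
--             "description / label / etc. was either ≥ 30 chars (assumed "
--             "human-curated, preserved) or had no enriched alternative._\n"
--         )
--
--     lines: list[str] = ["# Proposed overwrites", ""]
--     lines.append(
--         "Each entry below is a baseline value that was either replaced "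
--         "(because it was a < 30-char stub) or that the LLM flagged as "
--         "actually wrong. Review before the next iteration.\n"
--     )
--     by_table: dict[str, list[dict[str, Any]]] = {}
--     for e in ledger:
--         by_table.setdefault(e.get("table") or "<unknown>", []).append(e)
--
--     for table_name in sorted(by_table.keys()):
--         lines.append(f"## `{table_name}`\n")
--         for e in by_table[table_name]:
--             kind = e.get("field_kind") or "field"
--             name = e.get("field_name") or "<unnamed>"
--             attr = e.get("attribute") or "value"
--             lines.append(f"### {kind} `{name}` — `{attr}`")
--             source = e.get("source")
--             if source == "llm_flagged":
--                 lines.append("LLM-flagged as inaccurate (not auto-replaced).")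
--             else:
--                 lines.append(f"_{e.get('reason', '')}_")
--             lines.append("")
--             lines.append("**baseline:**")
--             lines.append(f"```\n{e.get('baseline_value', '')}\n```")
--             lines.append("**proposed:**")
--             lines.append(f"```\n{e.get('proposed_value', '')}\n```")
--             lines.append("")
--     return "\n".join(lines)
-- ===== SOURCE B (Python) =====
-- def _render_overwrites_md(ledger: list) -> str:
--     """Render the merge ledger to a scannable markdown report."""
--     if not ledger:
--         return (
--             "# Proposed overwrites\n\n"
--             "_No baseline values were replaced this run — every existing "
--             "description / label / etc. was either ≥ 30 chars (assumed "
--             "human-curated, preserved) or had no enriched alternative._\n"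
--         )
--
--     def key(e):
--         return e.get("table") or "<unknown>"
--
--     def entry_lines(e):
--         kind = e.get("field_kind") or "field"
--         name = e.get("field_name") or "<unnamed>"
--         attr = e.get("attribute") or "value"
--         return [
--             f"### {kind} `{name}` — `{attr}`",
--             "LLM-flagged as inaccurate (not auto-replaced)."
--             if e.get("source") == "llm_flagged"
--             else f"_{e.get('reason', '')}_",
--             "",
--             "**baseline:**",
--             f"```\n{e.get('baseline_value', '')}\n```",
--             "**proposed:**",
--             f"```\n{e.get('proposed_value', '')}\n```",
--             "",
--         ]
--
--     body: list[str] = []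
--     for table_name in sorted({key(e) for e in ledger}):
--         body.append(f"## `{table_name}`\n")
--         for e in ledger:
--             if key(e) == table_name:
--                 body.extend(entry_lines(e))
--
--     return "\n".join(
--         [
--             "# Proposed overwrites",
--             "",
--             "Each entry below is a baseline value that was either replaced "
--             "(because it was a < 30-char stub) or that the LLM flagged as "
--             "actually wrong. Review before the next iteration.\n",
--         ]
--         + body
--     )
-- ===== Notes on version B (the rewrite author's own statement) =====
-- stated objective: alternative
-- what changed: B drops A's dict bucketing entirely: it computes the sorted distinct table keys from a set and emits each section by filtering the ledger per key, with a per-entry helper building the lines, instead of A's one-pass dict grouping followed by a key sort and nested append loops.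
import Mathlib
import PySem

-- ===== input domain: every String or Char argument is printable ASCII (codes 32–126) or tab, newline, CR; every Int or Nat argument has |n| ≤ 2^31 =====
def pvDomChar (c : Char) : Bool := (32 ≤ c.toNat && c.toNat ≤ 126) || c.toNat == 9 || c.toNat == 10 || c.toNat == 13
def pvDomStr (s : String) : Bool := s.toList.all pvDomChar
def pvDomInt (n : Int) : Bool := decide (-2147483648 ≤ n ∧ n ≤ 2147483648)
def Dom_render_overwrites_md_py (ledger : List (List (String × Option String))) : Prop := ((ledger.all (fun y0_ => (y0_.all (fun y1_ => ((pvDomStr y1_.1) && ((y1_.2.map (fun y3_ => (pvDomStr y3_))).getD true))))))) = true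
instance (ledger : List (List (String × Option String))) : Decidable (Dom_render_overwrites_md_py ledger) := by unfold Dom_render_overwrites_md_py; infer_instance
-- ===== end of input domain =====

-- B replaces A's dict bucketing with sorted distinct keys plus a per-key filter scan (objective: alternative).

-- shared expression-level helpers (Python expression semantics, used by both ports)

-- e.get(k) on a dict whose values may be None, flattened to Option String
def pvGet (e : List (String × Option String)) (k : String) : Option String :=
  ((PySem.Dict.mk e).get? k).join

-- Python `x or d` for x an Optional[str]
def pvOrStr (x : Option String) (d : String) : String :=
  match x with
  | some s => if s = "" then d else s
  | none => d

-- f-string rendering of e.get(k, ''): an actual None value prints as "None"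
def pvGetFmt (e : List (String × Option String)) (k : String) : String :=
  match (PySem.Dict.mk e).get? k with
  | none => ""
  | some none => "None"
  | some (some s) => s

-- e.get("table") or "<unknown>"
def pvKeyOf (e : List (String × Option String)) : String :=
  pvOrStr (pvGet e "table") "<unknown>"

def pvEmptyReport : String :=
  "# Proposed overwrites\n\n_No baseline values were replaced this run — every existing description / label / etc. was either ≥ 30 chars (assumed human-curated, preserved) or had no enriched alternative._\n"

def pvIntro : String :=
  "Each entry below is a baseline value that was either replaced (because it was a < 30-char stub) or that the LLM flagged as actually wrong. Review before the next iteration.\n"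

-- ===== PORT A =====
def render_overwrites_md_py (ledger : List (List (String × Option String))) : String :=
  if ledger = [] then pvEmptyReport
  else
    let lines : List String := ["# Proposed overwrites", ""]
    let lines := lines ++ [pvIntro]
    -- by_table.setdefault(key, []).append(e)  ==  by_table[key] = by_table.get(key, []) + [e]
    let by_table := ledger.foldl
      (fun d e => d.modify (pvKeyOf e) [] (· ++ [e])) PySem.Dict.empty
    let lines := (PySem.List.sorted (PySem.Dict.keys by_table) (fun k => k) false).foldl
      (fun acc t =>
        (by_table.getD t []).foldl
          (fun a e =>
            let kind := pvOrStr (pvGet e "field_kind") "field"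
            let name := pvOrStr (pvGet e "field_name") "<unnamed>"
            let attr := pvOrStr (pvGet e "attribute") "value"
            let a := a ++ ["### " ++ kind ++ " `" ++ name ++ "` — `" ++ attr ++ "`"]
            let a := if pvGet e "source" = some "llm_flagged" then
                a ++ ["LLM-flagged as inaccurate (not auto-replaced)."]
              else
                a ++ ["_" ++ pvGetFmt e "reason" ++ "_"]
            let a := a ++ [""]
            let a := a ++ ["**baseline:**"]
            let a := a ++ ["```\n" ++ pvGetFmt e "baseline_value" ++ "\n```"]
            let a := a ++ ["**proposed:**"]
            let a := a ++ ["```\n" ++ pvGetFmt e "proposed_value" ++ "\n```"]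
            a ++ [""])
          (acc ++ ["## `" ++ t ++ "`\n"]))
      lines
    PySem.Str.join "\n" lines

-- ===== PORT B =====
-- entry_lines(e) of Source B
def pvEntryLines (e : List (String × Option String)) : List String :=
  let kind := pvOrStr (pvGet e "field_kind") "field"
  let name := pvOrStr (pvGet e "field_name") "<unnamed>"
  let attr := pvOrStr (pvGet e "attribute") "value"
  [ "### " ++ kind ++ " `" ++ name ++ "` — `" ++ attr ++ "`",
    if pvGet e "source" = some "llm_flagged" then
      "LLM-flagged as inaccurate (not auto-replaced)."
    else
      "_" ++ pvGetFmt e "reason" ++ "_",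
    "",
    "**baseline:**",
    "```\n" ++ pvGetFmt e "baseline_value" ++ "\n```",
    "**proposed:**",
    "```\n" ++ pvGetFmt e "proposed_value" ++ "\n```",
    "" ]

def render_overwrites_md_py_alt (ledger : List (List (String × Option String))) : String :=
  if ledger = [] then pvEmptyReport
  else
    let body := (PySem.List.sorted (PySem.Set.ofList (ledger.map pvKeyOf)) (fun k => k) false).foldl
      (fun body t =>
        ledger.foldl
          (fun b e => if pvKeyOf e = t then b ++ pvEntryLines e else b)
          (body ++ ["## `" ++ t ++ "`\n"]))
      []
    PySem.Str.join "\n" (["# Proposed overwrites", "", pvIntro] ++ body)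

-- ===== PRECONDITION & SPEC =====
def Spec_render_overwrites_md_py (ledger : List (List (String × Option String))) (out : String) : Prop := out = render_overwrites_md_py_alt ledger
instance (ledger : List (List (String × Option String))) (out : String) : Decidable (Spec_render_overwrites_md_py ledger out) := by unfold Spec_render_overwrites_md_py; infer_instance

-- ===== CLAIM (what is proved, stated in full; the proofs are below) =====
def Claim_equal_render_overwrites_md_py : Prop := ∀ (ledger : List (List (String × Option String))), Dom_render_overwrites_md_py ledger → Spec_render_overwrites_md_py ledger (render_overwrites_md_py ledger)

-- ===== LEMMAS AND PROOFS =====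

-- A's inner entry loop emits exactly pvEntryLines per entry
lemma innerA_eq (g : List (List (String × Option String))) :
    ∀ acc : List String,
      g.foldl
        (fun a e =>
          let kind := pvOrStr (pvGet e "field_kind") "field"
          let name := pvOrStr (pvGet e "field_name") "<unnamed>"
          let attr := pvOrStr (pvGet e "attribute") "value"
          let a := a ++ ["### " ++ kind ++ " `" ++ name ++ "` — `" ++ attr ++ "`"]
          let a := if pvGet e "source" = some "llm_flagged" then
              a ++ ["LLM-flagged as inaccurate (not auto-replaced)."]
            else
              a ++ ["_" ++ pvGetFmt e "reason" ++ "_"]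
          let a := a ++ [""]
          let a := a ++ ["**baseline:**"]
          let a := a ++ ["```\n" ++ pvGetFmt e "baseline_value" ++ "\n```"]
          let a := a ++ ["**proposed:**"]
          let a := a ++ ["```\n" ++ pvGetFmt e "proposed_value" ++ "\n```"]
          a ++ [""]) acc
      = acc ++ g.flatMap pvEntryLines := by
  induction g with
  | nil => intro acc; simp
  | cons e g ih =>
    intro acc
    rw [List.foldl_cons, ih, List.flatMap_cons]
    simp only [pvEntryLines]
    split_ifs <;> simp

-- B's inner filter loop emits pvEntryLines for entries whose key is t
lemma innerB_eq (ledger : List (List (String × Option String))) (t : String) :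
    ∀ acc : List String,
      ledger.foldl (fun b e => if pvKeyOf e = t then b ++ pvEntryLines e else b) acc
      = acc ++ (ledger.filter (fun e => pvKeyOf e == t)).flatMap pvEntryLines := by
  induction ledger with
  | nil => intro acc; simp
  | cons e g ih =>
    intro acc
    rw [List.foldl_cons, List.filter_cons]
    by_cases h : pvKeyOf e = t
    · simp [h, ih, List.flatMap_cons]
    · simp [h, ih]

-- generic outer-loop shape: one section per key
lemma outerA_eq (bt : String → List (List (String × Option String))) :
    ∀ (ks : List String) (acc : List String),
      ks.foldl
        (fun acc t =>
          (bt t).foldl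
            (fun a e =>
              let kind := pvOrStr (pvGet e "field_kind") "field"
              let name := pvOrStr (pvGet e "field_name") "<unnamed>"
              let attr := pvOrStr (pvGet e "attribute") "value"
              let a := a ++ ["### " ++ kind ++ " `" ++ name ++ "` — `" ++ attr ++ "`"]
              let a := if pvGet e "source" = some "llm_flagged" then
                  a ++ ["LLM-flagged as inaccurate (not auto-replaced)."]
                else
                  a ++ ["_" ++ pvGetFmt e "reason" ++ "_"]
              let a := a ++ [""]
              let a := a ++ ["**baseline:**"]
              let a := a ++ ["```\n" ++ pvGetFmt e "baseline_value" ++ "\n```"]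
              let a := a ++ ["**proposed:**"]
              let a := a ++ ["```\n" ++ pvGetFmt e "proposed_value" ++ "\n```"]
              a ++ [""])
            (acc ++ ["## `" ++ t ++ "`\n"]))
        acc
      = acc ++ ks.flatMap (fun t => ("## `" ++ t ++ "`\n") :: (bt t).flatMap pvEntryLines) := by
  intro ks
  induction ks with
  | nil => intro acc; simp
  | cons t ks ih =>
    intro acc
    rw [List.foldl_cons, innerA_eq, ih, List.flatMap_cons]
    simp

lemma outerB_eq (ledger : List (List (String × Option String))) :
    ∀ (ks : List String) (acc : List String),
      ks.foldl
        (fun body t =>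
          ledger.foldl
            (fun b e => if pvKeyOf e = t then b ++ pvEntryLines e else b)
            (body ++ ["## `" ++ t ++ "`\n"]))
        acc
      = acc ++ ks.flatMap (fun t =>
          ("## `" ++ t ++ "`\n") :: (ledger.filter (fun e => pvKeyOf e == t)).flatMap pvEntryLines) := by
  intro ks
  induction ks with
  | nil => intro acc; simp
  | cons t ks ih =>
    intro acc
    rw [List.foldl_cons, innerB_eq, ih, List.flatMap_cons]
    simp

-- the dict built by A has the distinct keys of ledger (first occurrences, in order)
lemma keysA_eq (ledger : List (List (String × Option String))) :
    PySem.Dict.keys (ledger.foldl (fun d e => d.modify (pvKeyOf e) [] (· ++ [e])) PySem.Dict.empty)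
    = PySem.Set.ofList (ledger.map pvKeyOf) := by
  rw [PySem.Dict.keys_foldl_modify_key]
  simp [PySem.Set.update_nil_left]

-- each bucket of A's dict is the filter of the ledger by that key
lemma bucketA_eq (ledger : List (List (String × Option String))) (t : String) :
    (ledger.foldl (fun d e => d.modify (pvKeyOf e) [] (· ++ [e])) PySem.Dict.empty).getD t []
    = ledger.filter (fun e => pvKeyOf e == t) := by
  have h : ledger.foldl (fun d e => d.modify (pvKeyOf e) [] (· ++ [e])) PySem.Dict.empty
      = (ledger.map (fun e => (pvKeyOf e, e))).foldl
          (fun d p => d.modify p.1 [] (· ++ [p.2])) PySem.Dict.empty := by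
    rw [List.foldl_map]
  rw [h, PySem.Dict.getD_foldl_modify_append]
  simp [List.filter_map, Function.comp_def]

-- ===== VERDICT (by name: the statement is the Claim_ definition above) =====
theorem render_overwrites_md_py_spec : Claim_equal_render_overwrites_md_py := by
  intro ledger _
  unfold Spec_render_overwrites_md_py render_overwrites_md_py render_overwrites_md_py_alt
  by_cases hnil : ledger = []
  · simp [hnil]
  · simp only [hnil, if_false]
    rw [outerA_eq, outerB_eq, keysA_eq]
    have hb : (fun t => ("## `" ++ t ++ "`\n") ::
          List.flatMap pvEntryLines
            ((List.foldl (fun d e => d.modify (pvKeyOf e) [] fun x => x ++ [e]) PySem.Dict.empty ledger).getD t []))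
        = (fun t => ("## `" ++ t ++ "`\n") ::
            List.flatMap pvEntryLines (List.filter (fun e => pvKeyOf e == t) ledger)) := by
      funext t
      rw [bucketA_eq]
    rw [hb]
    simp
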